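-- pv_equiv track=rewrite | github.com/mannmalviya/leetcode | contest_prblms/weekly_contest/week_484/3803_Count_Residue_Prefixes.py | residuePrefixes_second_imp
-- ===== SOURCE A (Python) =====
-- def residuePrefixes_second_imp(s:str) -> int:
--     """
--         - beats 100% in runitme and 75% in space
--
--         Time and Space comp same as above
--     """
--     ans = 0
--     unique_chrs = set()
--     l = len(s)
--
--     for i in range(l):
--         if s[i] not in unique_chrs:
--             unique_chrs.add(s[i])
--         if len(unique_chrs) == (i+1) % 3:
--             ans+=1
--
--     return ans
-- ===== SOURCE B (Python) =====
-- def residuePrefixes_second_imp(s: str) -> int: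
--     return sum(1 for k in range(1, len(s) + 1) if len(set(s[:k])) == k % 3)
-- ===== Notes on version B (the rewrite author's own statement) =====
-- stated objective: idiomatic
-- what changed: Replaces A's single pass with a maintained running set and counter by a one-line sum over prefix lengths that recomputes each prefix's distinct-character count from scratch with len(set(s[:k])).
import Mathlib
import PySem

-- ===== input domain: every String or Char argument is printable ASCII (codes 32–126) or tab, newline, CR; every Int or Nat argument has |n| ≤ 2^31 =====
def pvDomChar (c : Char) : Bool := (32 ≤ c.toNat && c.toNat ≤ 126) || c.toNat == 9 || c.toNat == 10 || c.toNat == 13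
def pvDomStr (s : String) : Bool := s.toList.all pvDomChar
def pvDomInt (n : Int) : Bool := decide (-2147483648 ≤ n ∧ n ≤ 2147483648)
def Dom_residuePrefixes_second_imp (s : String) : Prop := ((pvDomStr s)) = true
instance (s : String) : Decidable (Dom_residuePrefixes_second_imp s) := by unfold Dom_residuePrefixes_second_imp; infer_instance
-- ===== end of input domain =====

-- B replaces A's single pass with a maintained running set and counter by an
-- idiomatic one-line sum over prefix lengths, recomputing each prefix's distinct
-- count from scratch as len(set(s[:k])).

-- ===== PORT A =====
-- the loop body of A: state (ans, unique_chrs), one step per (i, s[i])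
def pvStepA (st : Int × PySem.Set Char) (p : Int × Char) : Int × PySem.Set Char :=
  let u := if !(PySem.Set.contains st.2 p.2) then PySem.Set.add st.2 p.2 else st.2
  let a := if PySem.Set.len u == PySem.Int.mod (p.1 + 1) 3 then st.1 + 1 else st.1
  (a, u)

def residuePrefixes_second_imp (s : String) : Int :=
  ((PySem.List.enumerate s.toList 0).foldl pvStepA (0, PySem.Set.empty)).1

-- ===== PORT B =====
def residuePrefixes_second_imp_alt (s : String) : Int :=
  (PySem.List.pyRange 1 ((s.toList.length : Int) + 1)).foldl
    (fun acc k =>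
      if PySem.Set.len (PySem.Set.ofList (PySem.List.slice s.toList none (some k)))
           == PySem.Int.mod k 3
      then acc + 1 else acc) 0

-- ===== PRECONDITION & SPEC =====
def Spec_residuePrefixes_second_imp (s : String) (out : Int) : Prop := out = residuePrefixes_second_imp_alt s
instance (s : String) (out : Int) : Decidable (Spec_residuePrefixes_second_imp s out) := by unfold Spec_residuePrefixes_second_imp; infer_instance

-- ===== CLAIM (what is proved, stated in full; the proofs are below) =====
def Claim_equal_residuePrefixes_second_imp : Prop := ∀ (s : String), Dom_residuePrefixes_second_imp s → Spec_residuePrefixes_second_imp s (residuePrefixes_second_imp s)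

-- ===== LEMMAS AND PROOFS =====

-- B's fold expressed directly on a list of characters
def pvBfold (cs : List Char) : Int :=
  (PySem.List.pyRange 1 ((cs.length : Int) + 1)).foldl
    (fun acc k =>
      if PySem.Set.len (PySem.Set.ofList (PySem.List.slice cs none (some k)))
           == PySem.Int.mod k 3
      then acc + 1 else acc) 0

-- A's guarded add is exactly Set.add
lemma pvAdd_eq (u : PySem.Set Char) (c : Char) :
    (if !(PySem.Set.contains u c) then PySem.Set.add u c else u) = PySem.Set.add u c := by
  by_cases h : PySem.Set.contains u c = true <;> simp [PySem.Set.add]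

lemma pvBfold_snoc (xs : List Char) (x : Char) :
    pvBfold (xs ++ [x]) =
      if PySem.Set.len (PySem.Set.add (PySem.Set.ofList xs) x)
           == PySem.Int.mod ((xs.length : Int) + 1) 3
      then pvBfold xs + 1 else pvBfold xs := by
  have hslice : PySem.List.slice (xs ++ [x]) none (some ((xs.length : Int) + 1)) = xs ++ [x] := by
    rw [PySem.List.slice_to _ (by omega)]
    refine List.take_of_length_le ?_
    have h1 : (((xs.length : Int)) + 1).toNat = xs.length + 1 := by omega
    rw [h1]; simp
  have hcongr : (PySem.List.pyRange 1 ((xs.length : Int) + 1)).foldl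
      (fun acc k =>
        if PySem.Set.len (PySem.Set.ofList (PySem.List.slice (xs ++ [x]) none (some k)))
             == PySem.Int.mod k 3 then acc + 1 else acc) (0 : Int)
      = (PySem.List.pyRange 1 ((xs.length : Int) + 1)).foldl
      (fun acc k =>
        if PySem.Set.len (PySem.Set.ofList (PySem.List.slice xs none (some k)))
             == PySem.Int.mod k 3 then acc + 1 else acc) (0 : Int) := by
    refine PySem.List.foldl_congr_mem _ _ _ _ ?_
    intro acc k hk
    rw [PySem.List.mem_pyRange_one] at hk
    have h0 : (0:Int) ≤ k := by omega
    rw [PySem.List.slice_to _ h0, PySem.List.slice_to _ h0,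
      List.take_append_of_le_length (by omega)]
  unfold pvBfold
  rw [show (((xs ++ [x]).length : Nat) : Int) + 1 = ((xs.length : Int) + 1) + 1 by simp,
    PySem.List.pyRange_one_succ_right (by omega), List.foldl_append]
  conv_lhs => rw [hcongr]
  simp only [List.foldl_cons, List.foldl_nil, hslice, PySem.Set.ofList_append_singleton]

lemma pvMain (cs : List Char) :
    (PySem.List.enumerate cs 0).foldl pvStepA (0, PySem.Set.empty)
      = (pvBfold cs, PySem.Set.ofList cs) := by
  induction cs using List.reverseRecOn with
  | nil => rfl
  | append_singleton xs x ih =>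
    rw [PySem.List.enumerate_append, List.foldl_append, ih, pvBfold_snoc,
      PySem.Set.ofList_append_singleton]
    simp only [PySem.List.enumerate_cons, PySem.List.enumerate_nil, List.foldl_cons,
      List.foldl_nil, pvStepA, pvAdd_eq, Prod.mk.injEq]
    norm_num

-- ===== VERDICT (by name: the statement is the Claim_ definition above) =====
theorem residuePrefixes_second_imp_spec : Claim_equal_residuePrefixes_second_imp := by
  intro s _
  unfold Spec_residuePrefixes_second_imp residuePrefixes_second_imp
  rw [pvMain]
  rfl
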